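-- pv_equiv track=rewrite | github.com/Hong-Jinseo/Algorithm | programmers/84021.py | convert
-- ===== SOURCE A (Python) =====
-- def convert(xys, target):
--     default = 1 if target == 0 else 0
--     fixed = {i: [] for i in range(1, 7)}
--     for i in xys:
--         for xy in xys[i]:
--             # 좌측 상단 좌표
--             lx, ly = min(p[0] for p in xy), min(p[1] for p in xy)
--             # 우측 하단 좌표
--             rx, ry = max(p[0] for p in xy), max(p[1] for p in xy)
--
--             width = ry - ly + 1
--             height = rx - lx + 1
--
--             # 퍼즐이 포함된 최소 사각형 만들기
--             temp = [[default] * width for _ in range(height)]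
--             for x, y in xy:
--                 temp[x - lx][y - ly] = target
--
--             fixed[i].append(temp)
--     return fixed
-- ===== SOURCE B (Python) =====
-- def convert(xys, target):
--     default = 1 if target == 0 else 0
--
--     def grid(xy):
--         lx, ly, rx, ry = xy[0][0], xy[0][1], xy[0][0], xy[0][1]
--         for x, y in xy[1:]:
--             if x < lx:
--                 lx = x
--             if y < ly:
--                 ly = y
--             if x > rx:
--                 rx = x
--             if y > ry:
--                 ry = y
--         coords = {(x, y) for x, y in xy}
--         return [[target if (r + lx, c + ly) in coords else default
--                  for c in range(ry - ly + 1)]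
--                 for r in range(rx - lx + 1)]
--
--     return {i: [grid(xy) for xy in xys.get(i, [])] for i in range(1, 7)}
-- ===== Notes on version B (the rewrite author's own statement) =====
-- stated objective: alternative
-- what changed: B computes each piece's bounding box in one conditional-update pass over the points (instead of A's four min/max generator passes), fills the grid by a per-cell coordinate-set lookup over the bounding box (instead of A's fill-with-default-then-overwrite writes), and builds the result key-first as a dict comprehension over range(1,7) with xys.get(i, []) (instead of A's pre-initialised dict with per-piece appends while iterating the input's keys).
import Mathlib
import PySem

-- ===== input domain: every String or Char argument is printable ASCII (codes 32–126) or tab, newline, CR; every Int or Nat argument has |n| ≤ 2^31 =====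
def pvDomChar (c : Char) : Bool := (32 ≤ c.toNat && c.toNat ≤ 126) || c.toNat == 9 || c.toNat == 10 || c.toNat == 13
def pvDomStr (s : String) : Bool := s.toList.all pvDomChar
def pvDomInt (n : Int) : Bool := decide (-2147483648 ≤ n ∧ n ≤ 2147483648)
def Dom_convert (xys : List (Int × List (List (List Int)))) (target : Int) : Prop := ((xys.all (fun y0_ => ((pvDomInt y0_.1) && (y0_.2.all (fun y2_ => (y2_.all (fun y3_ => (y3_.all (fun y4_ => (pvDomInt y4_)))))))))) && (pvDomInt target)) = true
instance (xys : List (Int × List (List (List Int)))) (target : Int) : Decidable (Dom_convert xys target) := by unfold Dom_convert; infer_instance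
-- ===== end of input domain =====

-- B: one-pass bounding-box fold, per-cell coordinate-set lookup, result built key-first
-- over range(1,7) with .get — instead of A's min/max passes, fill-then-overwrite and
-- pre-initialised-dict appends; same values, no speed claim.

-- ===== PORT A =====
-- temp[i][j] = v  (Python list assignment; exact when the indices are in range, as they
-- always are for A's writes, which land inside the bounding box).
def pySetCell (t : List (List Int)) (i j v : Int) : List (List Int) :=
  let i' := if i < 0 then i + (t.length : Int) else i
  t.modify i'.toNat (fun row =>
    let j' := if j < 0 then j + (row.length : Int) else j
    row.set j'.toNat v)

-- the body of A's inner loop: one piece's grid (fill with default, overwrite listed cells)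
def gridA (xy : List (List Int)) (target default : Int) : List (List Int) :=
  let lx := ((PySem.List.min? (xy.map (fun p => (PySem.List.pyGet? p 0).getD 0)) (fun v => v)).getD 0)
  let ly := ((PySem.List.min? (xy.map (fun p => (PySem.List.pyGet? p 1).getD 0)) (fun v => v)).getD 0)
  let rx := ((PySem.List.max? (xy.map (fun p => (PySem.List.pyGet? p 0).getD 0)) (fun v => v)).getD 0)
  let ry := ((PySem.List.max? (xy.map (fun p => (PySem.List.pyGet? p 1).getD 0)) (fun v => v)).getD 0)
  let width := ry - ly + 1
  let height := rx - lx + 1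
  let temp0 := List.replicate height.toNat (List.replicate width.toNat default)
  xy.foldl (fun t p =>
    let x := (PySem.List.pyGet? p 0).getD 0
    let y := (PySem.List.pyGet? p 1).getD 0
    pySetCell t (x - lx) (y - ly) target) temp0

def convert (xys : List (Int × List (List (List Int)))) (target : Int) : List (Int × List (List (List Int))) :=
  let defaultv : Int := if target = 0 then 1 else 0
  let fixed0 : PySem.Dict Int (List (List (List Int))) :=
    (PySem.List.pyRange 1 7 1).foldl (fun d i => d.insert i ([] : List (List (List Int)))) PySem.Dict.empty
  let d := PySem.Dict.ofList xys
  let fixed := d.keys.foldl (fun fx i =>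
      (d.getD i []).foldl (fun fx xy => fx.insert i (fx.getD i [] ++ [gridA xy target defaultv])) fx) fixed0
  fixed.items

-- ===== PORT B =====
-- B's grid(): bounds seeded from xy[0] and folded in ONE pass over xy[1:], then a per-cell
-- membership lookup over the bounding box
def gridB (xy : List (List Int)) (target default : Int) : List (List Int) :=
  let h := (PySem.List.pyGet? xy 0).getD []
  let x0 := (PySem.List.pyGet? h 0).getD 0
  let y0 := (PySem.List.pyGet? h 1).getD 0
  let b := (PySem.List.slice xy (some 1) none).foldl
    (fun (s : Int × Int × Int × Int) p =>
      let x := (PySem.List.pyGet? p 0).getD 0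
      let y := (PySem.List.pyGet? p 1).getD 0
      (if x < s.1 then x else s.1,
       if y < s.2.1 then y else s.2.1,
       if x > s.2.2.1 then x else s.2.2.1,
       if y > s.2.2.2 then y else s.2.2.2)) (x0, y0, x0, y0)
  let lx := b.1
  let ly := b.2.1
  let rx := b.2.2.1
  let ry := b.2.2.2
  let coords : PySem.Set (Int × Int) :=
    PySem.Set.ofList (xy.map (fun p => ((PySem.List.pyGet? p 0).getD 0, (PySem.List.pyGet? p 1).getD 0)))
  (PySem.List.pyRange 0 (rx - lx + 1) 1).map (fun r =>
    (PySem.List.pyRange 0 (ry - ly + 1) 1).map (fun c =>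
      if coords.contains (r + lx, c + ly) then target else default))

-- B's dict comprehension {i: [grid(xy) for xy in xys.get(i, [])] for i in range(1, 7)}:
-- keys 1..6 are distinct, so its items are this map
def convert_alt (xys : List (Int × List (List (List Int)))) (target : Int) : List (Int × List (List (List Int))) :=
  let defaultv : Int := if target = 0 then 1 else 0
  let d := PySem.Dict.ofList xys
  (PySem.List.pyRange 1 7 1).map (fun i =>
    (i, (d.getD i []).map (fun xy => gridB xy target defaultv)))

-- ===== PRECONDITION & SPEC =====
-- A raises KeyError when an effective dict entry with a NONEMPTY piece list has a key
-- outside 1..6, and ValueError (min of empty / tuple unpack) or IndexError when an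
-- effective piece is empty or contains a point that is not a pair; exactly those inputs
-- are excluded (conditions are over the effective dict entries, so values shadowed by a
-- duplicate key are unconstrained; keys outside 1..6 with EMPTY piece lists are admitted).
def Pre_convert (xys : List (Int × List (List (List Int)))) (target : Int) : Prop :=
  ∀ p ∈ (PySem.Dict.ofList xys).items,
    (p.2 ≠ [] → 1 ≤ p.1 ∧ p.1 ≤ 6) ∧ ∀ xy ∈ p.2, xy ≠ [] ∧ ∀ q ∈ xy, q.length = 2
instance (xys : List (Int × List (List (List Int)))) (target : Int) : Decidable (Pre_convert xys target) := by unfold Pre_convert; infer_instance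

def pvWitness_convert : (List (Int × List (List (List Int)))) × Int :=
  ([(1, [[[0, 0], [0, 1], [1, 1]]]), (8, [])], 1)

def Spec_convert (xys : List (Int × List (List (List Int)))) (target : Int) (out : List (Int × List (List (List Int)))) : Prop := out = convert_alt xys target
instance (xys : List (Int × List (List (List Int)))) (target : Int) (out : List (Int × List (List (List Int)))) : Decidable (Spec_convert xys target out) := by unfold Spec_convert; infer_instance

-- ===== CLAIM (what is proved, stated in full; the proofs are below) =====
def Claim_equal_convert : Prop := ∀ (xys : List (Int × List (List (List Int)))) (target : Int), Dom_convert xys target → Pre_convert xys target → Spec_convert xys target (convert xys target)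

-- ===== LEMMAS AND PROOFS =====
-- the (r, c) cell of a grid, as A's writes see it (defaults are irrelevant in range)
def cellAt (t : List (List Int)) (r c : Nat) : Int := (t.getD r []).getD c 0

theorem getD_modify_list (l : List (List Int)) (n : Nat) (f : List Int → List Int) (r : Nat) :
    (l.modify n f).getD r [] = if n = r ∧ r < l.length then f (l.getD r []) else l.getD r [] := by
  simp only [List.getD_eq_getElem?_getD, List.getElem?_modify]
  rcases h : l[r]? with _ | row
  · have : ¬ r < l.length := by simpa [List.getElem?_eq_none_iff] using h
    simp [this]
  · have hr : r < l.length := by have := List.getElem?_eq_some_iff.mp h; exact this.1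
    by_cases hn : n = r <;> simp [hn, hr]

theorem length_pySetCell (t : List (List Int)) (i j v : Int) :
    (pySetCell t i j v).length = t.length := by
  simp [pySetCell]
theorem rowlen_pySetCell (t : List (List Int)) (i j v : Int) (r : Nat) :
    ((pySetCell t i j v).getD r []).length = (t.getD r []).length := by
  unfold pySetCell
  rw [getD_modify_list]
  split_ifs <;> simp

theorem getD_set_int (row : List Int) (m : Nat) (v : Int) (c : Nat) :
    (row.set m v).getD c 0 = if m = c ∧ m < row.length then v else row.getD c 0 := by
  simp only [List.getD_eq_getElem?_getD, List.getElem?_set]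
  by_cases hm : m = c
  · subst hm
    by_cases hl : m < row.length
    · simp [hl]
    · have h0 : row[m]? = none := by rw [List.getElem?_eq_none_iff]; omega
      simp [hl]
  · simp [hm]

theorem cell_pySetCell (t : List (List Int)) (i j v : Int)
    (hi : 0 ≤ i) (hi2 : i < (t.length : Int)) (hj : 0 ≤ j)
    (hj2 : j < ((t.getD i.toNat []).length : Int)) (r c : Nat) :
    cellAt (pySetCell t i j v) r c =
      if i = (r : Int) ∧ j = (c : Int) then v else cellAt t r c := by
  unfold cellAt pySetCell
  rw [if_neg (show ¬ i < 0 by omega), getD_modify_list]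
  by_cases h1 : i.toNat = r ∧ r < t.length
  · rw [if_pos h1]
    simp only [if_neg (show ¬ j < 0 by omega), getD_set_int]
    rw [h1.1] at hj2
    by_cases h2 : i = (r : Int) ∧ j = (c : Int)
    · rw [if_pos (show j.toNat = c ∧ j.toNat < (t.getD r []).length by omega), if_pos h2]
    · rw [if_neg (show ¬ (j.toNat = c ∧ j.toNat < (t.getD r []).length) by omega), if_neg h2]
  · rw [if_neg h1, if_neg (show ¬ (i = (r : Int) ∧ j = (c : Int)) by omega)]

theorem foldl_write (v : Int) (qs : List (Int × Int)) :
    ∀ (t : List (List Int)) (W : Nat),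
    (∀ r : Nat, r < t.length → (t.getD r []).length = W) →
    (∀ q ∈ qs, 0 ≤ q.1 ∧ q.1 < (t.length : Int) ∧ 0 ≤ q.2 ∧ q.2 < (W : Int)) →
    ((qs.foldl (fun t q => pySetCell t q.1 q.2 v) t).length = t.length) ∧
    (∀ r : Nat, ((qs.foldl (fun t q => pySetCell t q.1 q.2 v) t).getD r []).length = (t.getD r []).length) ∧
    (∀ r c : Nat, cellAt (qs.foldl (fun t q => pySetCell t q.1 q.2 v) t) r c =
       if (∃ q ∈ qs, q.1 = (r : Int) ∧ q.2 = (c : Int)) then v else cellAt t r c) := by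
  induction qs with
  | nil => intro t W _ _; simp
  | cons q qs ih =>
    intro t W hrect hb
    have hq := hb q (by simp)
    set t1 := pySetCell t q.1 q.2 v with ht1
    have hlen1 : t1.length = t.length := length_pySetCell t q.1 q.2 v
    have hrow1 : ∀ r : Nat, (t1.getD r []).length = (t.getD r []).length :=
      fun r => rowlen_pySetCell t q.1 q.2 v r
    have hrect1 : ∀ r : Nat, r < t1.length → (t1.getD r []).length = W := by
      intro r hr; rw [hrow1]; exact hrect r (by omega)
    have hb1 : ∀ p ∈ qs, 0 ≤ p.1 ∧ p.1 < (t1.length : Int) ∧ 0 ≤ p.2 ∧ p.2 < (W : Int) := by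
      intro p hp; have := hb p (by simp [hp]); omega
    obtain ⟨ihl, ihr, ihc⟩ := ih t1 W hrect1 hb1
    have hcell1 : ∀ r c : Nat, cellAt t1 r c =
        if q.1 = (r : Int) ∧ q.2 = (c : Int) then v else cellAt t r c := by
      intro r c
      apply cell_pySetCell t q.1 q.2 v (by omega) (by omega) (by omega)
      have : (t.getD q.1.toNat []).length = W := hrect q.1.toNat (by omega)
      omega
    refine ⟨by rw [List.foldl_cons, ihl, hlen1], ?_, ?_⟩
    · intro r; rw [List.foldl_cons, ihr, hrow1]
    · intro r c
      rw [List.foldl_cons, ihc, hcell1]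
      by_cases hex : ∃ p ∈ qs, p.1 = (r : Int) ∧ p.2 = (c : Int)
      · rw [if_pos hex, if_pos (by rcases hex with ⟨p, hp, h⟩; exact ⟨p, by simp [hp], h⟩)]
      · rw [if_neg hex]
        by_cases hq1 : q.1 = (r : Int) ∧ q.2 = (c : Int)
        · rw [if_pos hq1, if_pos ⟨q, by simp, hq1⟩]
        · rw [if_neg hq1, if_neg (by rintro ⟨p, hp, h⟩; rcases List.mem_cons.mp hp with rfl | hp'; exact hq1 h; exact hex ⟨p, hp', h⟩)]

theorem grid_ext (t u : List (List Int)) (ht : t.length = u.length)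
    (hrow : ∀ r, (t.getD r []).length = (u.getD r []).length)
    (hcell : ∀ r c, cellAt t r c = cellAt u r c) : t = u := by
  apply List.ext_getElem?
  intro r
  by_cases hr : r < t.length
  · rw [List.getElem?_eq_getElem hr, List.getElem?_eq_getElem (by omega)]
    have hg : t.getD r [] = t[r] := by rw [List.getD_eq_getElem?_getD, List.getElem?_eq_getElem hr]; rfl
    have hg' : u.getD r [] = u[r]'(by omega) := by
      rw [List.getD_eq_getElem?_getD, List.getElem?_eq_getElem (show r < u.length by omega)]; rfl
    congr 1
    apply List.ext_getElem?
    intro c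
    have hlen : t[r].length = (u[r]'(by omega)).length := by rw [← hg, ← hg', hrow r]
    by_cases hc : c < t[r].length
    · rw [List.getElem?_eq_getElem hc, List.getElem?_eq_getElem (by omega)]
      have := hcell r c
      unfold cellAt at this
      rw [hg, hg'] at this
      rw [List.getD_eq_getElem?_getD, List.getElem?_eq_getElem hc] at this
      rw [List.getD_eq_getElem?_getD, List.getElem?_eq_getElem (show c < (u[r]'(by omega)).length by omega)] at this
      simpa using this
    · rw [List.getElem?_eq_none_iff.mpr (by omega), List.getElem?_eq_none_iff.mpr (by omega)]
  · rw [List.getElem?_eq_none_iff.mpr (by omega), List.getElem?_eq_none_iff.mpr (by omega)]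

theorem getD_replicate {α : Type} (n r : Nat) (a d : α) :
    (List.replicate n a).getD r d = if r < n then a else d := by
  rw [List.getD_eq_getElem?_getD, List.getElem?_replicate]
  by_cases h : r < n <;> simp [h]

theorem pyRangeMap_len {α : Type} (n : Nat) (f : Int → α) :
    ((PySem.List.pyRange 0 (n : Int) 1).map f).length = n := by
  rw [PySem.List.pyRange_zero_natCast]; simp

theorem pyRangeMap_getD (n : Nat) (f : Int → List Int) (r : Nat) :
    ((PySem.List.pyRange 0 (n : Int) 1).map f).getD r [] = if r < n then f (r : Int) else [] := by
  rw [PySem.List.pyRange_zero_natCast, List.map_map]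
  by_cases hr : r < n
  · rw [List.getD_eq_getElem?_getD, List.getElem?_map, List.getElem?_range hr]
    simp [hr]
  · rw [List.getD_eq_getElem?_getD, List.getElem?_eq_none_iff.mpr (by simpa using hr)]
    simp [hr]

theorem pyRangeMapI_getD (n : Nat) (f : Int → Int) (c : Nat) :
    ((PySem.List.pyRange 0 (n : Int) 1).map f).getD c 0 = if c < n then f (c : Int) else 0 := by
  rw [PySem.List.pyRange_zero_natCast, List.map_map]
  by_cases hc : c < n
  · rw [List.getD_eq_getElem?_getD, List.getElem?_map, List.getElem?_range hc]
    simp [hc]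
  · rw [List.getD_eq_getElem?_getD, List.getElem?_eq_none_iff.mpr (by simpa using hc)]
    simp [hc]

-- B's single conditional-update pass computes the four running extrema
theorem foldl_bounds (ts : List (List Int)) :
    ∀ (a b c d : Int),
    ts.foldl (fun (s : Int × Int × Int × Int) p =>
      let x := (PySem.List.pyGet? p 0).getD 0
      let y := (PySem.List.pyGet? p 1).getD 0
      (if x < s.1 then x else s.1,
       if y < s.2.1 then y else s.2.1,
       if x > s.2.2.1 then x else s.2.2.1,
       if y > s.2.2.2 then y else s.2.2.2)) (a, b, c, d)
    = ((ts.map (fun p => (PySem.List.pyGet? p 0).getD 0)).foldl min a,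
       (ts.map (fun p => (PySem.List.pyGet? p 1).getD 0)).foldl min b,
       (ts.map (fun p => (PySem.List.pyGet? p 0).getD 0)).foldl max c,
       (ts.map (fun p => (PySem.List.pyGet? p 1).getD 0)).foldl max d) := by
  induction ts with
  | nil => intro a b c d; rfl
  | cons p ts ih =>
    intro a b c d
    rw [List.foldl_cons]
    simp only [List.map_cons, List.foldl_cons]
    rw [ih]
    simp only [Prod.mk.injEq]
    refine ⟨?_, ?_, ?_, ?_⟩
    · congr 1; rw [min_def]; split_ifs <;> omega
    · congr 1; rw [min_def]; split_ifs <;> omega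
    · congr 1; rw [max_def]; split_ifs <;> omega
    · congr 1; rw [max_def]; split_ifs <;> omega

theorem grid_eq (xy : List (List Int)) (target defv : Int) :
    gridA xy target defv = gridB xy target defv := by
  rcases xy with _ | ⟨hd, tl⟩
  · rfl
  simp only [gridA, gridB]
  set g0 : List Int → Int := fun p => (PySem.List.pyGet? p 0).getD 0 with hg0
  set g1 : List Int → Int := fun p => (PySem.List.pyGet? p 1).getD 0 with hg1
  set lx : Int := (tl.map g0).foldl min (g0 hd) with hlxd
  set ly : Int := (tl.map g1).foldl min (g1 hd) with hlyd
  set rx : Int := (tl.map g0).foldl max (g0 hd) with hrxd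
  set ry : Int := (tl.map g1).foldl max (g1 hd) with hryd
  have hlx : PySem.List.min? ((hd :: tl).map g0) (fun v => v) = some lx := by
    rw [List.map_cons]; exact PySem.List.min?_id_cons _ _
  have hly : PySem.List.min? ((hd :: tl).map g1) (fun v => v) = some ly := by
    rw [List.map_cons]; exact PySem.List.min?_id_cons _ _
  have hrx : PySem.List.max? ((hd :: tl).map g0) (fun v => v) = some rx := by
    rw [List.map_cons]; exact PySem.List.max?_id_cons _ _
  have hry : PySem.List.max? ((hd :: tl).map g1) (fun v => v) = some ry := by
    rw [List.map_cons]; exact PySem.List.max?_id_cons _ _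
  -- B's head reads and one-pass bounds
  have hhd : (PySem.List.pyGet? (hd :: tl) 0).getD [] = hd := by
    simp [PySem.List.pyGet?, PySem.List.pyIdx?]
  have hslice : PySem.List.slice (hd :: tl) (some 1) none = tl := by
    rw [PySem.List.slice_from_one]; rfl
  rw [hlx, hly, hrx, hry, hhd, hslice]
  simp only [Option.getD_some]
  rw [foldl_bounds]
  have hgh0 : (PySem.List.pyGet? hd 0).getD 0 = g0 hd := rfl
  have hgh1 : (PySem.List.pyGet? hd 1).getD 0 = g1 hd := rfl
  simp only [hgh0, hgh1, ← hg0, ← hg1]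
  simp only [← hlxd, ← hlyd, ← hrxd, ← hryd]
  -- bounds facts
  have hlo0 : ∀ p ∈ hd :: tl, lx ≤ g0 p := fun p hp =>
    PySem.List.min?_isMin hlx _ (List.mem_map_of_mem hp)
  have hhi0 : ∀ p ∈ hd :: tl, g0 p ≤ rx := fun p hp =>
    PySem.List.max?_isMax hrx _ (List.mem_map_of_mem hp)
  have hlo1 : ∀ p ∈ hd :: tl, ly ≤ g1 p := fun p hp =>
    PySem.List.min?_isMin hly _ (List.mem_map_of_mem hp)
  have hhi1 : ∀ p ∈ hd :: tl, g1 p ≤ ry := fun p hp =>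
    PySem.List.max?_isMax hry _ (List.mem_map_of_mem hp)
  have hlr0 : lx ≤ rx := le_trans (hlo0 hd (by simp)) (hhi0 hd (by simp))
  have hlr1 : ly ≤ ry := le_trans (hlo1 hd (by simp)) (hhi1 hd (by simp))
  set H : Nat := (rx - lx + 1).toNat with hHdef
  set W : Nat := (ry - ly + 1).toNat with hWdef
  have hH : (H : Int) = rx - lx + 1 := Int.toNat_of_nonneg (by omega)
  have hW : (W : Int) = ry - ly + 1 := Int.toNat_of_nonneg (by omega)
  set temp0 : List (List Int) := List.replicate H (List.replicate W defv) with htemp0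
  set qs : List (Int × Int) := (hd :: tl).map (fun p => ((PySem.List.pyGet? p 0).getD 0 - lx, (PySem.List.pyGet? p 1).getD 0 - ly)) with hqs
  have hA : (List.foldl (fun t p => pySetCell t ((PySem.List.pyGet? p 0).getD 0 - lx) ((PySem.List.pyGet? p 1).getD 0 - ly) target) temp0 (hd :: tl))
      = List.foldl (fun t q => pySetCell t q.1 q.2 target) temp0 qs := by
    rw [hqs, List.foldl_map]
  have htlen : temp0.length = H := by rw [htemp0, List.length_replicate]
  have hrect : ∀ r : Nat, r < temp0.length → (temp0.getD r []).length = W := by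
    intro r hr
    rw [htemp0, List.getD_eq_getElem?_getD, List.getElem?_replicate,
      if_pos (by rwa [htlen] at hr : r < H)]
    simp
  have hqb : ∀ q ∈ qs, 0 ≤ q.1 ∧ q.1 < (temp0.length : Int) ∧ 0 ≤ q.2 ∧ q.2 < (W : Int) := by
    intro q hq
    rw [hqs] at hq
    obtain ⟨p, hp, rfl⟩ := List.mem_map.mp hq
    have h1 := hlo0 p hp; have h2 := hhi0 p hp
    have h3 := hlo1 p hp; have h4 := hhi1 p hp
    rw [htlen]
    simp only [hg0, hg1] at h1 h2 h3 h4
    refine ⟨by omega, by omega, by omega, by omega⟩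
  obtain ⟨hl, hrw, hcell⟩ := foldl_write target qs temp0 W hrect hqb
  set coords : PySem.Set (Int × Int) :=
    PySem.Set.ofList ((hd :: tl).map (fun p => ((PySem.List.pyGet? p 0).getD 0, (PySem.List.pyGet? p 1).getD 0))) with hcoords
  have hP : ∀ r c : Nat, (∃ q ∈ qs, q.1 = (r : Int) ∧ q.2 = (c : Int)) ↔
      coords.contains ((r : Int) + lx, (c : Int) + ly) = true := by
    intro r c
    rw [hqs, hcoords]
    simp only [PySem.Set.contains, List.contains_iff_mem, PySem.Set.mem_ofList, List.mem_map]
    constructor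
    · rintro ⟨q, ⟨p, hp, rfl⟩, h1, h2⟩
      exact ⟨p, hp, by simp only [Prod.mk.injEq]; omega⟩
    · rintro ⟨p, hp, hpe⟩
      simp only [Prod.mk.injEq] at hpe
      exact ⟨_, ⟨p, hp, rfl⟩, by omega, by omega⟩
  have htcell : ∀ r c : Nat, cellAt temp0 r c = if r < H ∧ c < W then defv else 0 := by
    intro r c
    unfold cellAt
    rw [htemp0, getD_replicate]
    by_cases hrH : r < H
    · rw [if_pos hrH, getD_replicate]
      by_cases hcW : c < W
      · rw [if_pos hcW, if_pos ⟨hrH, hcW⟩]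
      · rw [if_neg hcW, if_neg (by omega)]
    · rw [if_neg hrH, if_neg (by omega)]
      simp
  rw [hA]
  apply grid_ext
  · rw [hl, htlen, ← hH, pyRangeMap_len]
  · intro r
    rw [hrw r]
    simp only [← hH, ← hW, pyRangeMap_getD]
    by_cases hrH : r < H
    · rw [if_pos hrH, hrect r (by omega), pyRangeMap_len]
    · rw [if_neg hrH, htemp0, getD_replicate, if_neg hrH]
  · intro r c
    rw [hcell r c, htcell r c]
    simp only [cellAt]
    simp only [← hH, ← hW, pyRangeMap_getD]
    by_cases hrH : r < H
    · rw [if_pos hrH]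
      simp only [pyRangeMapI_getD]
      by_cases hcW : c < W
      · rw [if_pos hcW]
        by_cases hex : ∃ q ∈ qs, q.1 = (r : Int) ∧ q.2 = (c : Int)
        · rw [if_pos hex, if_pos ((hP r c).mp hex)]
        · rw [if_neg hex, if_pos (show r < H ∧ c < W from ⟨hrH, hcW⟩),
            if_neg (show ¬ coords.contains ((r : Int) + lx, (c : Int) + ly) = true from fun h => hex ((hP r c).mpr h))]
      · rw [if_neg hcW,
          if_neg (show ¬ ∃ q ∈ qs, q.1 = (r : Int) ∧ q.2 = (c : Int) by rintro ⟨q, hq, h1, h2⟩; have := hqb q hq; rw [htlen] at this; omega),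
          if_neg (by omega)]
    · rw [if_neg hrH,
        if_neg (show ¬ ∃ q ∈ qs, q.1 = (r : Int) ∧ q.2 = (c : Int) by rintro ⟨q, hq, h1, h2⟩; have := hqb q hq; rw [htlen] at this; omega),
        if_neg (by omega)]
      simp

theorem inner_getD (G : List (List Int) → List (List Int)) (i : Int)
    (ys : List (List (List Int))) :
    ∀ (fx : PySem.Dict Int (List (List (List Int)))) (j : Int),
    (ys.foldl (fun fx xy => fx.insert i (fx.getD i [] ++ [G xy])) fx).getD j []
      = if j = i then fx.getD i [] ++ ys.map G else fx.getD j [] := by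
  induction ys with
  | nil => intro fx j; by_cases h : j = i <;> simp [h]
  | cons y ys ih =>
    intro fx j
    rw [List.foldl_cons, ih]
    by_cases h : j = i
    · subst h
      rw [if_pos rfl, if_pos rfl, PySem.Dict.getD_insert, if_pos rfl]
      simp
    · rw [if_neg h, if_neg h, PySem.Dict.getD_insert, if_neg h]

theorem inner_keys (G : List (List Int) → List (List Int)) (i : Int)
    (ys : List (List (List Int))) :
    ∀ (fx : PySem.Dict Int (List (List (List Int)))), fx.contains i = true →
    (ys.foldl (fun fx xy => fx.insert i (fx.getD i [] ++ [G xy])) fx).keys = fx.keys := by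
  induction ys with
  | nil => intro fx _; rfl
  | cons y ys ih =>
    intro fx hc
    rw [List.foldl_cons, ih _ (by rw [PySem.Dict.contains_insert]; simp),
      PySem.Dict.keys_insert_of_contains _ _ hc]

theorem outer_fold (G : List (List Int) → List (List Int))
    (d : PySem.Dict Int (List (List (List Int)))) (ks : List Int) :
    ∀ (fx : PySem.Dict Int (List (List (List Int)))), ks.Nodup →
    (∀ k ∈ ks, d.getD k [] ≠ [] → fx.contains k = true) →
    ((ks.foldl (fun fx i =>
        (d.getD i []).foldl (fun fx xy => fx.insert i (fx.getD i [] ++ [G xy])) fx) fx).keys = fx.keys) ∧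
    (∀ j : Int, (ks.foldl (fun fx i =>
        (d.getD i []).foldl (fun fx xy => fx.insert i (fx.getD i [] ++ [G xy])) fx) fx).getD j []
      = fx.getD j [] ++ (if j ∈ ks then (d.getD j []).map G else [])) := by
  induction ks with
  | nil => intro fx _ _; exact ⟨rfl, by simp⟩
  | cons k ks ih =>
    intro fx hnd hc
    by_cases hke : d.getD k [] = []
    · obtain ⟨ihk, ihg⟩ := ih fx hnd.of_cons
        (fun k' hk' => hc k' (List.mem_cons_of_mem _ hk'))
      refine ⟨by rw [List.foldl_cons, hke, List.foldl_nil, ihk], ?_⟩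
      intro j
      rw [List.foldl_cons, hke, List.foldl_nil, ihg j]
      by_cases hjk : j = k
      · subst hjk
        have hjs : j ∉ ks := (List.nodup_cons.mp hnd).1
        rw [if_neg hjs, if_pos (List.mem_cons_self), hke]
        simp
      · by_cases hjs : j ∈ ks
        · rw [if_pos hjs, if_pos (List.mem_cons_of_mem _ hjs)]
        · rw [if_neg hjs, if_neg (by simp [hjk, hjs])]
    · have hck : fx.contains k = true := hc k (by simp) hke
      obtain ⟨ihk, ihg⟩ := ih ((d.getD k []).foldl (fun fx xy => fx.insert k (fx.getD k [] ++ [G xy])) fx)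
        hnd.of_cons
        (by
          intro k' hk' hne
          rw [PySem.Dict.contains_iff_mem_keys, inner_keys G k _ fx hck,
            ← PySem.Dict.contains_iff_mem_keys]
          exact hc k' (List.mem_cons_of_mem _ hk') hne)
      refine ⟨by rw [List.foldl_cons, ihk, inner_keys G k _ fx hck], ?_⟩
      intro j
      rw [List.foldl_cons, ihg j, inner_getD]
      by_cases hjk : j = k
      · subst hjk
        have hjs : j ∉ ks := (List.nodup_cons.mp hnd).1
        rw [if_pos rfl, if_neg hjs, if_pos (List.mem_cons_self)]
        simp
      · rw [if_neg hjk]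
        by_cases hjs : j ∈ ks
        · rw [if_pos hjs, if_pos (List.mem_cons_of_mem _ hjs)]
        · rw [if_neg hjs, if_neg (by simp [hjk, hjs])]

theorem convert_eq (xys : List (Int × List (List (List Int)))) (target : Int)
    (hpre : ∀ p ∈ (PySem.Dict.ofList xys).items, p.2 ≠ [] → 1 ≤ p.1 ∧ p.1 ≤ 6) :
    convert xys target = convert_alt xys target := by
  simp only [convert, convert_alt]
  set d := PySem.Dict.ofList xys with hd
  set fixed0 : PySem.Dict Int (List (List (List Int))) :=
    (PySem.List.pyRange 1 7 1).foldl (fun d i => d.insert i ([] : List (List (List Int)))) PySem.Dict.empty with hf0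
  have hknd : d.keys.Nodup := PySem.Dict.nodup_keys_ofList xys
  have hf0keys : fixed0.keys = [1, 2, 3, 4, 5, 6] := by decide
  have hitems : d.items = d.keys.map (fun k => (k, d.getD k [])) :=
    PySem.Dict.items_eq_map_keys d hknd []
  have hc0 : ∀ k ∈ d.keys, d.getD k [] ≠ [] → fixed0.contains k = true := by
    intro k hk hne
    have hmem : (k, d.getD k []) ∈ d.items := by
      rw [hitems]; exact List.mem_map_of_mem hk
    have := hpre _ hmem hne
    rw [PySem.Dict.contains_eq_decide_mem_keys, hf0keys]
    simp only [decide_eq_true_eq, List.mem_cons, List.not_mem_nil, or_false]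
    omega
  obtain ⟨hkfA, hgfA⟩ := outer_fold (fun xy => gridA xy target (if target = 0 then 1 else 0)) d
    d.keys fixed0 hknd hc0
  have hndA : (List.foldl (fun fx i =>
      (d.getD i []).foldl (fun fx xy =>
        fx.insert i (fx.getD i [] ++ [gridA xy target (if target = 0 then 1 else 0)])) fx) fixed0 d.keys).keys.Nodup := by
    rw [hkfA, hf0keys]; decide
  rw [PySem.Dict.items_eq_map_keys _ hndA [], hkfA, hf0keys,
    (by decide : PySem.List.pyRange 1 7 1 = [1, 2, 3, 4, 5, 6])]
  apply List.map_congr_left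
  intro k hk
  rw [hgfA k]
  have hf0g : fixed0.getD k [] = [] := by
    simp only [List.mem_cons, List.not_mem_nil, or_false] at hk
    rcases hk with rfl | rfl | rfl | rfl | rfl | rfl <;> decide
  rw [hf0g, List.nil_append]
  by_cases hmem : k ∈ d.keys
  · rw [if_pos hmem]
    exact congrArg (Prod.mk k)
      (List.map_congr_left (fun xy _ => grid_eq xy target (if target = 0 then 1 else 0)))
  · rw [if_neg hmem]
    have hkc : d.contains k = false := by
      rw [PySem.Dict.contains_eq_decide_mem_keys]
      simpa using hmem
    rw [PySem.Dict.getD_of_not_contains d [] hkc]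
    simp

-- ===== VERDICT (by name: the statement is the Claim_ definition above) =====
theorem convert_spec : Claim_equal_convert := by
  intro xys target _ hpre
  unfold Spec_convert
  exact convert_eq xys target (fun p hp => (hpre p hp).1)
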